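-- pv_equiv track=rewrite | github.com/engremran07/gsmvault | apps/firmwares/tool_matcher.py | get_chipset_family
-- ===== SOURCE A (Python) =====
-- def get_chipset_family(chipset: str) -> str:
--     """Extract chipset family name from a full chipset string.
--
--     >>> get_chipset_family("MediaTek MT6739")
--     'MediaTek'
--     >>> get_chipset_family("Qualcomm Snapdragon 8 Gen 3")
--     'Qualcomm'
--     >>> get_chipset_family("Apple A17 Pro")
--     'Apple'
--     """
--     if not chipset:
--         return ""
--     low = chipset.lower()
--     if any(k in low for k in ("mediatek", "mt6", "mt8", "helio", "dimensity")):
--         return "MediaTek"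
--     if any(k in low for k in ("qualcomm", "snapdragon", "msm8", "sdm", "sm8")):
--         return "Qualcomm"
--     if "exynos" in low:
--         return "Samsung Exynos"
--     if any(k in low for k in ("unisoc", "spreadtrum", "sc9")):
--         return "Unisoc"
--     if "apple" in low:
--         return "Apple"
--     if any(k in low for k in ("rockchip", "rk3")):
--         return "Rockchip"
--     if "tensor" in low:
--         return "Google Tensor"
--     if "kirin" in low:
--         return "Kirin"
--     return ""
-- ===== SOURCE B (Python) =====
-- _FAMILIES = ["MediaTek", "Qualcomm", "Samsung Exynos", "Unisoc",
--              "Apple", "Rockchip", "Google Tensor", "Kirin"]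
--
-- _KEYWORDS = [(0, "mediatek"), (0, "mt6"), (0, "mt8"), (0, "helio"), (0, "dimensity"),
--              (1, "qualcomm"), (1, "snapdragon"), (1, "msm8"), (1, "sdm"), (1, "sm8"),
--              (2, "exynos"),
--              (3, "unisoc"), (3, "spreadtrum"), (3, "sc9"),
--              (4, "apple"),
--              (5, "rockchip"), (5, "rk3"),
--              (6, "tensor"),
--              (7, "kirin")]
--
--
-- def get_chipset_family(chipset: str) -> str:
--     # Single left-to-right scan: at every position, prefix-test the keywords
--     # and keep the minimum (highest-priority) matching family index.
--     low = chipset.lower()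
--     best = len(_FAMILIES)
--     for i in range(len(low)):
--         for fam, kw in _KEYWORDS:
--             if fam < best and low.startswith(kw, i):
--                 best = fam
--     return _FAMILIES[best] if best < len(_FAMILIES) else ""
-- ===== Notes on version B (the rewrite author's own statement) =====
-- stated objective: alternative
-- what changed: Replaces the per-family substring-membership cascade with a single left-to-right scan of the lowercased string that prefix-tests all keywords at each position and keeps the minimum (highest-priority) matching family index, indexing a name table at the end.
import Mathlib
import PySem

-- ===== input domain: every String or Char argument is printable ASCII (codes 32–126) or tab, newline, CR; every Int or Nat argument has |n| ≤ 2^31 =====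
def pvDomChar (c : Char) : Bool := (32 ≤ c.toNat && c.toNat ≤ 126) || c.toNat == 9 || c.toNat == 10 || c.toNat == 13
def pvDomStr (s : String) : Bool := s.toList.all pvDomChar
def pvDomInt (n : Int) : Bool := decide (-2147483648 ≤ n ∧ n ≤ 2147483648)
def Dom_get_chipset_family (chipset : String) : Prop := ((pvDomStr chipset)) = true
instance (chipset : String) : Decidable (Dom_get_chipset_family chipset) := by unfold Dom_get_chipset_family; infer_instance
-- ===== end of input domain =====

-- B replaces A's per-family substring cascade with one left-to-right scan of the
-- lowercased string keeping the minimum-priority keyword match (alternative algorithm, same cost).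


-- ===== PORT A =====
def get_chipset_family (chipset : String) : String :=
  if chipset.toList = [] then ""
  else
    let low := PySem.Str.lower chipset
    if ["mediatek", "mt6", "mt8", "helio", "dimensity"].any (fun k => PySem.Str.isIn k low) then "MediaTek"
    else if ["qualcomm", "snapdragon", "msm8", "sdm", "sm8"].any (fun k => PySem.Str.isIn k low) then "Qualcomm"
    else if PySem.Str.isIn "exynos" low then "Samsung Exynos"
    else if ["unisoc", "spreadtrum", "sc9"].any (fun k => PySem.Str.isIn k low) then "Unisoc"
    else if PySem.Str.isIn "apple" low then "Apple"
    else if ["rockchip", "rk3"].any (fun k => PySem.Str.isIn k low) then "Rockchip"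
    else if PySem.Str.isIn "tensor" low then "Google Tensor"
    else if PySem.Str.isIn "kirin" low then "Kirin"
    else ""

-- ===== PORT B =====
def pvFamNames : List String :=
  ["MediaTek", "Qualcomm", "Samsung Exynos", "Unisoc", "Apple", "Rockchip", "Google Tensor", "Kirin"]

def pvKws : List (Nat × List Char) :=
  [(0, "mediatek".toList), (0, "mt6".toList), (0, "mt8".toList), (0, "helio".toList), (0, "dimensity".toList),
   (1, "qualcomm".toList), (1, "snapdragon".toList), (1, "msm8".toList), (1, "sdm".toList), (1, "sm8".toList),
   (2, "exynos".toList),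
   (3, "unisoc".toList), (3, "spreadtrum".toList), (3, "sc9".toList),
   (4, "apple".toList),
   (5, "rockchip".toList), (5, "rk3".toList),
   (6, "tensor".toList),
   (7, "kirin".toList)]

-- inner loop of B: update `best` with every keyword that starts at the current position
def pvInner (l : List Char) (b : Nat) : Nat :=
  pvKws.foldl (fun b p => if p.1 < b && p.2.isPrefixOf l then p.1 else b) b

-- outer loop of B: the scan over positions i = 0,1,… realised as recursion on the suffix low[i:]
def pvScan : List Char → Nat → Nat
  | [], b => b
  | c :: rest, b => pvScan rest (pvInner (c :: rest) b)

def get_chipset_family_alt (chipset : String) : String :=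
  let low := PySem.Chars.lower chipset.toList
  let best := pvScan low pvFamNames.length
  if best < pvFamNames.length then pvFamNames.getD best "" else ""

-- ===== PRECONDITION & SPEC =====
def Spec_get_chipset_family (chipset : String) (out : String) : Prop := out = get_chipset_family_alt chipset
instance (chipset : String) (out : String) : Decidable (Spec_get_chipset_family chipset out) := by unfold Spec_get_chipset_family; infer_instance

-- ===== CLAIM (what is proved, stated in full; the proofs are below) =====
def Claim_equal_get_chipset_family : Prop := ∀ (chipset : String), Dom_get_chipset_family chipset → Spec_get_chipset_family chipset (get_chipset_family chipset)

-- ===== LEMMAS AND PROOFS =====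

-- minimum family index whose keyword is a prefix of l (8 when none)
def pvP (l : List Char) : Nat :=
  pvKws.foldr (fun p r => if p.2.isPrefixOf l then min p.1 r else r) 8

-- minimum family index whose keyword occurs anywhere in l (8 when none)
def pvM : List Char → Nat
  | [] => 8
  | c :: rest => min (pvP (c :: rest)) (pvM rest)

theorem pv_fold_min (L : List (Nat × List Char)) (l : List Char) :
    ∀ b, b ≤ 8 →
    L.foldl (fun b p => if p.1 < b && p.2.isPrefixOf l then p.1 else b) b
      = min b (L.foldr (fun p r => if p.2.isPrefixOf l then min p.1 r else r) 8) := by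
  induction L with
  | nil => intro b hb; simp; omega
  | cons p L ih =>
    intro b hb
    simp only [List.foldl_cons, List.foldr_cons]
    cases hp : p.2.isPrefixOf l with
    | false => simp only [Bool.and_false, Bool.false_eq_true, if_false]; exact ih b hb
    | true =>
      simp only [Bool.and_true, decide_eq_true_eq]
      rw [ih _ (by split_ifs <;> omega), if_pos trivial]
      split_ifs <;> omega

theorem pvInner_eq (l : List Char) (b : Nat) (hb : b ≤ 8) : pvInner l b = min b (pvP l) :=
  pv_fold_min pvKws l b hb

theorem pvScan_eq : ∀ (l : List Char) (b : Nat), b ≤ 8 → pvScan l b = min b (pvM l) := by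
  intro l
  induction l with
  | nil => intro b hb; simp [pvScan, pvM]; omega
  | cons c rest ih =>
    intro b hb
    simp only [pvScan, pvM]
    rw [pvInner_eq _ _ hb, ih _ (by omega)]
    omega

theorem pv_foldr_le_iff (L : List (Nat × List Char)) (l : List Char) (f : Nat) (hf : f < 8) :
    (L.foldr (fun p r => if p.2.isPrefixOf l then min p.1 r else r) 8) ≤ f
      ↔ ∃ p ∈ L, p.1 ≤ f ∧ p.2 <+: l := by
  induction L with
  | nil => simp; omega
  | cons p L ih =>
    simp only [List.foldr_cons, List.mem_cons]
    cases hp : p.2.isPrefixOf l with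
    | false =>
      rw [if_neg (by simp [hp])]
      constructor
      · intro h; obtain ⟨q, hq, h1, h2⟩ := ih.mp h; exact ⟨q, Or.inr hq, h1, h2⟩
      · rintro ⟨q, (rfl | hq), h1, h2⟩
        · exact absurd ((List.isPrefixOf_iff_prefix).mpr h2) (by simp [hp])
        · exact ih.mpr ⟨q, hq, h1, h2⟩
    | true =>
      rw [if_pos (by simp [hp])]
      constructor
      · intro h
        rcases min_le_iff.mp h with h1 | h1
        · exact ⟨p, Or.inl rfl, h1, (List.isPrefixOf_iff_prefix).mp hp⟩
        · obtain ⟨q, hq, ha, hb⟩ := ih.mp h1; exact ⟨q, Or.inr hq, ha, hb⟩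
      · rintro ⟨q, (rfl | hq), h1, h2⟩
        · exact le_trans (Nat.min_le_left _ _) h1
        · exact le_trans (Nat.min_le_right _ _) (ih.mpr ⟨q, hq, h1, h2⟩)

theorem pvP_le_iff (l : List Char) (f : Nat) (hf : f < 8) :
    pvP l ≤ f ↔ ∃ p ∈ pvKws, p.1 ≤ f ∧ p.2 <+: l :=
  pv_foldr_le_iff pvKws l f hf

theorem pvM_le_iff (l : List Char) (f : Nat) (hf : f < 8) :
    pvM l ≤ f ↔ ∃ p ∈ pvKws, p.1 ≤ f ∧ p.2 <:+: l := by
  induction l with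
  | nil =>
    simp only [pvM, List.infix_nil]
    constructor
    · omega
    · rintro ⟨p, hp, -, h2⟩
      have : p.2 ≠ [] := by fin_cases hp <;> decide
      exact absurd h2 this
  | cons c rest ih =>
    simp only [pvM, min_le_iff, pvP_le_iff _ f hf, ih, List.infix_cons_iff]
    constructor
    · rintro (⟨p, hp, h1, h2⟩ | ⟨p, hp, h1, h2⟩)
      · exact ⟨p, hp, h1, Or.inl h2⟩
      · exact ⟨p, hp, h1, Or.inr h2⟩
    · rintro ⟨p, hp, h1, (h2 | h2)⟩
      · exact Or.inl ⟨p, hp, h1, h2⟩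
      · exact Or.inr ⟨p, hp, h1, h2⟩

theorem pv_alt_empty (chipset : String) (h : chipset.toList = []) :
    get_chipset_family_alt chipset = "" := by
  simp [get_chipset_family_alt, h, PySem.Chars.lower, pvScan]

theorem pvMle0 (l : List Char) : pvM l ≤ 0 ↔ (("mediatek".toList <:+: l ∨ "mt6".toList <:+: l ∨ "mt8".toList <:+: l ∨ "helio".toList <:+: l ∨ "dimensity".toList <:+: l)) := by
  rw [pvM_le_iff l 0 (by omega)]
  simp [pvKws, or_assoc]

theorem pvMle1 (l : List Char) : pvM l ≤ 1 ↔ (("mediatek".toList <:+: l ∨ "mt6".toList <:+: l ∨ "mt8".toList <:+: l ∨ "helio".toList <:+: l ∨ "dimensity".toList <:+: l) ∨ ("qualcomm".toList <:+: l ∨ "snapdragon".toList <:+: l ∨ "msm8".toList <:+: l ∨ "sdm".toList <:+: l ∨ "sm8".toList <:+: l)) := by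
  rw [pvM_le_iff l 1 (by omega)]
  simp [pvKws, or_assoc]

theorem pvMle2 (l : List Char) : pvM l ≤ 2 ↔ (("mediatek".toList <:+: l ∨ "mt6".toList <:+: l ∨ "mt8".toList <:+: l ∨ "helio".toList <:+: l ∨ "dimensity".toList <:+: l) ∨ ("qualcomm".toList <:+: l ∨ "snapdragon".toList <:+: l ∨ "msm8".toList <:+: l ∨ "sdm".toList <:+: l ∨ "sm8".toList <:+: l) ∨ ("exynos".toList <:+: l)) := by
  rw [pvM_le_iff l 2 (by omega)]
  simp [pvKws, or_assoc]

theorem pvMle3 (l : List Char) : pvM l ≤ 3 ↔ (("mediatek".toList <:+: l ∨ "mt6".toList <:+: l ∨ "mt8".toList <:+: l ∨ "helio".toList <:+: l ∨ "dimensity".toList <:+: l) ∨ ("qualcomm".toList <:+: l ∨ "snapdragon".toList <:+: l ∨ "msm8".toList <:+: l ∨ "sdm".toList <:+: l ∨ "sm8".toList <:+: l) ∨ ("exynos".toList <:+: l) ∨ ("unisoc".toList <:+: l ∨ "spreadtrum".toList <:+: l ∨ "sc9".toList <:+: l)) := by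
  rw [pvM_le_iff l 3 (by omega)]
  simp [pvKws, or_assoc]

theorem pvMle4 (l : List Char) : pvM l ≤ 4 ↔ (("mediatek".toList <:+: l ∨ "mt6".toList <:+: l ∨ "mt8".toList <:+: l ∨ "helio".toList <:+: l ∨ "dimensity".toList <:+: l) ∨ ("qualcomm".toList <:+: l ∨ "snapdragon".toList <:+: l ∨ "msm8".toList <:+: l ∨ "sdm".toList <:+: l ∨ "sm8".toList <:+: l) ∨ ("exynos".toList <:+: l) ∨ ("unisoc".toList <:+: l ∨ "spreadtrum".toList <:+: l ∨ "sc9".toList <:+: l) ∨ ("apple".toList <:+: l)) := by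
  rw [pvM_le_iff l 4 (by omega)]
  simp [pvKws, or_assoc]

theorem pvMle5 (l : List Char) : pvM l ≤ 5 ↔ (("mediatek".toList <:+: l ∨ "mt6".toList <:+: l ∨ "mt8".toList <:+: l ∨ "helio".toList <:+: l ∨ "dimensity".toList <:+: l) ∨ ("qualcomm".toList <:+: l ∨ "snapdragon".toList <:+: l ∨ "msm8".toList <:+: l ∨ "sdm".toList <:+: l ∨ "sm8".toList <:+: l) ∨ ("exynos".toList <:+: l) ∨ ("unisoc".toList <:+: l ∨ "spreadtrum".toList <:+: l ∨ "sc9".toList <:+: l) ∨ ("apple".toList <:+: l) ∨ ("rockchip".toList <:+: l ∨ "rk3".toList <:+: l)) := by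
  rw [pvM_le_iff l 5 (by omega)]
  simp [pvKws, or_assoc]

theorem pvMle6 (l : List Char) : pvM l ≤ 6 ↔ (("mediatek".toList <:+: l ∨ "mt6".toList <:+: l ∨ "mt8".toList <:+: l ∨ "helio".toList <:+: l ∨ "dimensity".toList <:+: l) ∨ ("qualcomm".toList <:+: l ∨ "snapdragon".toList <:+: l ∨ "msm8".toList <:+: l ∨ "sdm".toList <:+: l ∨ "sm8".toList <:+: l) ∨ ("exynos".toList <:+: l) ∨ ("unisoc".toList <:+: l ∨ "spreadtrum".toList <:+: l ∨ "sc9".toList <:+: l) ∨ ("apple".toList <:+: l) ∨ ("rockchip".toList <:+: l ∨ "rk3".toList <:+: l) ∨ ("tensor".toList <:+: l)) := by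
  rw [pvM_le_iff l 6 (by omega)]
  simp [pvKws, or_assoc]

theorem pvMle7 (l : List Char) : pvM l ≤ 7 ↔ (("mediatek".toList <:+: l ∨ "mt6".toList <:+: l ∨ "mt8".toList <:+: l ∨ "helio".toList <:+: l ∨ "dimensity".toList <:+: l) ∨ ("qualcomm".toList <:+: l ∨ "snapdragon".toList <:+: l ∨ "msm8".toList <:+: l ∨ "sdm".toList <:+: l ∨ "sm8".toList <:+: l) ∨ ("exynos".toList <:+: l) ∨ ("unisoc".toList <:+: l ∨ "spreadtrum".toList <:+: l ∨ "sc9".toList <:+: l) ∨ ("apple".toList <:+: l) ∨ ("rockchip".toList <:+: l ∨ "rk3".toList <:+: l) ∨ ("tensor".toList <:+: l) ∨ ("kirin".toList <:+: l)) := by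
  rw [pvM_le_iff l 7 (by omega)]
  simp [pvKws, or_assoc]

theorem pvA0 (chipset : String) : ((["mediatek", "mt6", "mt8", "helio", "dimensity"] : List String).any (fun k => PySem.Str.isIn k (PySem.Str.lower chipset)) = true) ↔ ("mediatek".toList <:+: PySem.Chars.lower chipset.toList ∨ "mt6".toList <:+: PySem.Chars.lower chipset.toList ∨ "mt8".toList <:+: PySem.Chars.lower chipset.toList ∨ "helio".toList <:+: PySem.Chars.lower chipset.toList ∨ "dimensity".toList <:+: PySem.Chars.lower chipset.toList) := by
  simp [PySem.Chars.isIn_iff_infix]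

theorem pvA1 (chipset : String) : ((["qualcomm", "snapdragon", "msm8", "sdm", "sm8"] : List String).any (fun k => PySem.Str.isIn k (PySem.Str.lower chipset)) = true) ↔ ("qualcomm".toList <:+: PySem.Chars.lower chipset.toList ∨ "snapdragon".toList <:+: PySem.Chars.lower chipset.toList ∨ "msm8".toList <:+: PySem.Chars.lower chipset.toList ∨ "sdm".toList <:+: PySem.Chars.lower chipset.toList ∨ "sm8".toList <:+: PySem.Chars.lower chipset.toList) := by
  simp [PySem.Chars.isIn_iff_infix]

theorem pvA3 (chipset : String) : ((["unisoc", "spreadtrum", "sc9"] : List String).any (fun k => PySem.Str.isIn k (PySem.Str.lower chipset)) = true) ↔ ("unisoc".toList <:+: PySem.Chars.lower chipset.toList ∨ "spreadtrum".toList <:+: PySem.Chars.lower chipset.toList ∨ "sc9".toList <:+: PySem.Chars.lower chipset.toList) := by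
  simp [PySem.Chars.isIn_iff_infix]

theorem pvA5 (chipset : String) : ((["rockchip", "rk3"] : List String).any (fun k => PySem.Str.isIn k (PySem.Str.lower chipset)) = true) ↔ ("rockchip".toList <:+: PySem.Chars.lower chipset.toList ∨ "rk3".toList <:+: PySem.Chars.lower chipset.toList) := by
  simp [PySem.Chars.isIn_iff_infix]

theorem pvA2 (chipset : String) : (PySem.Str.isIn "exynos" (PySem.Str.lower chipset) = true) ↔ ("exynos".toList <:+: PySem.Chars.lower chipset.toList) := by
  simp [PySem.Chars.isIn_iff_infix]

theorem pvA4 (chipset : String) : (PySem.Str.isIn "apple" (PySem.Str.lower chipset) = true) ↔ ("apple".toList <:+: PySem.Chars.lower chipset.toList) := by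
  simp [PySem.Chars.isIn_iff_infix]

theorem pvA6 (chipset : String) : (PySem.Str.isIn "tensor" (PySem.Str.lower chipset) = true) ↔ ("tensor".toList <:+: PySem.Chars.lower chipset.toList) := by
  simp [PySem.Chars.isIn_iff_infix]

theorem pvA7 (chipset : String) : (PySem.Str.isIn "kirin" (PySem.Str.lower chipset) = true) ↔ ("kirin".toList <:+: PySem.Chars.lower chipset.toList) := by
  simp [PySem.Chars.isIn_iff_infix]

theorem pvM_le_eight (l : List Char) : pvM l ≤ 8 := by
  induction l with
  | nil => simp [pvM]
  | cons c rest ih => simp only [pvM]; omega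

-- ===== VERDICT (by name: the statement is the Claim_ definition above) =====
theorem get_chipset_family_spec : Claim_equal_get_chipset_family := by
  intro chipset _
  unfold Spec_get_chipset_family
  by_cases hnil : chipset.toList = []
  · simp [get_chipset_family, hnil, pv_alt_empty chipset hnil]
  · simp only [get_chipset_family, if_neg hnil]
    by_cases h0 : ("mediatek".toList <:+: PySem.Chars.lower chipset.toList ∨ "mt6".toList <:+: PySem.Chars.lower chipset.toList ∨ "mt8".toList <:+: PySem.Chars.lower chipset.toList ∨ "helio".toList <:+: PySem.Chars.lower chipset.toList ∨ "dimensity".toList <:+: PySem.Chars.lower chipset.toList)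
    · rw [if_pos ((pvA0 chipset).mpr h0)]
      have ha := (pvMle0 (PySem.Chars.lower chipset.toList)).mpr (h0)
      have hM : pvM (PySem.Chars.lower chipset.toList) = 0 := by omega
      have e := pvScan_eq (PySem.Chars.lower chipset.toList) 8 le_rfl
      simp [get_chipset_family_alt, e, hM, pvFamNames]
    rw [if_neg (fun hc => h0 ((pvA0 chipset).mp hc))]
    by_cases h1 : ("qualcomm".toList <:+: PySem.Chars.lower chipset.toList ∨ "snapdragon".toList <:+: PySem.Chars.lower chipset.toList ∨ "msm8".toList <:+: PySem.Chars.lower chipset.toList ∨ "sdm".toList <:+: PySem.Chars.lower chipset.toList ∨ "sm8".toList <:+: PySem.Chars.lower chipset.toList)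
    · rw [if_pos ((pvA1 chipset).mpr h1)]
      have ha := (pvMle1 (PySem.Chars.lower chipset.toList)).mpr (Or.inr (h1))
      have hb : ¬ pvM (PySem.Chars.lower chipset.toList) ≤ 0 := fun h => by
        rcases (pvMle0 (PySem.Chars.lower chipset.toList)).mp h with g
        exacts [h0 g]
      have hM : pvM (PySem.Chars.lower chipset.toList) = 1 := by omega
      have e := pvScan_eq (PySem.Chars.lower chipset.toList) 8 le_rfl
      simp [get_chipset_family_alt, e, hM, pvFamNames]
    rw [if_neg (fun hc => h1 ((pvA1 chipset).mp hc))]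
    by_cases h2 : ("exynos".toList <:+: PySem.Chars.lower chipset.toList)
    · rw [if_pos ((pvA2 chipset).mpr h2)]
      have ha := (pvMle2 (PySem.Chars.lower chipset.toList)).mpr (Or.inr (Or.inr (h2)))
      have hb : ¬ pvM (PySem.Chars.lower chipset.toList) ≤ 1 := fun h => by
        rcases (pvMle1 (PySem.Chars.lower chipset.toList)).mp h with g|g
        exacts [h0 g, h1 g]
      have hM : pvM (PySem.Chars.lower chipset.toList) = 2 := by omega
      have e := pvScan_eq (PySem.Chars.lower chipset.toList) 8 le_rfl
      simp [get_chipset_family_alt, e, hM, pvFamNames]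
    rw [if_neg (fun hc => h2 ((pvA2 chipset).mp hc))]
    by_cases h3 : ("unisoc".toList <:+: PySem.Chars.lower chipset.toList ∨ "spreadtrum".toList <:+: PySem.Chars.lower chipset.toList ∨ "sc9".toList <:+: PySem.Chars.lower chipset.toList)
    · rw [if_pos ((pvA3 chipset).mpr h3)]
      have ha := (pvMle3 (PySem.Chars.lower chipset.toList)).mpr (Or.inr (Or.inr (Or.inr (h3))))
      have hb : ¬ pvM (PySem.Chars.lower chipset.toList) ≤ 2 := fun h => by
        rcases (pvMle2 (PySem.Chars.lower chipset.toList)).mp h with g|g|g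
        exacts [h0 g, h1 g, h2 g]
      have hM : pvM (PySem.Chars.lower chipset.toList) = 3 := by omega
      have e := pvScan_eq (PySem.Chars.lower chipset.toList) 8 le_rfl
      simp [get_chipset_family_alt, e, hM, pvFamNames]
    rw [if_neg (fun hc => h3 ((pvA3 chipset).mp hc))]
    by_cases h4 : ("apple".toList <:+: PySem.Chars.lower chipset.toList)
    · rw [if_pos ((pvA4 chipset).mpr h4)]
      have ha := (pvMle4 (PySem.Chars.lower chipset.toList)).mpr (Or.inr (Or.inr (Or.inr (Or.inr (h4)))))
      have hb : ¬ pvM (PySem.Chars.lower chipset.toList) ≤ 3 := fun h => by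
        rcases (pvMle3 (PySem.Chars.lower chipset.toList)).mp h with g|g|g|g
        exacts [h0 g, h1 g, h2 g, h3 g]
      have hM : pvM (PySem.Chars.lower chipset.toList) = 4 := by omega
      have e := pvScan_eq (PySem.Chars.lower chipset.toList) 8 le_rfl
      simp [get_chipset_family_alt, e, hM, pvFamNames]
    rw [if_neg (fun hc => h4 ((pvA4 chipset).mp hc))]
    by_cases h5 : ("rockchip".toList <:+: PySem.Chars.lower chipset.toList ∨ "rk3".toList <:+: PySem.Chars.lower chipset.toList)
    · rw [if_pos ((pvA5 chipset).mpr h5)]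
      have ha := (pvMle5 (PySem.Chars.lower chipset.toList)).mpr (Or.inr (Or.inr (Or.inr (Or.inr (Or.inr (h5))))))
      have hb : ¬ pvM (PySem.Chars.lower chipset.toList) ≤ 4 := fun h => by
        rcases (pvMle4 (PySem.Chars.lower chipset.toList)).mp h with g|g|g|g|g
        exacts [h0 g, h1 g, h2 g, h3 g, h4 g]
      have hM : pvM (PySem.Chars.lower chipset.toList) = 5 := by omega
      have e := pvScan_eq (PySem.Chars.lower chipset.toList) 8 le_rfl
      simp [get_chipset_family_alt, e, hM, pvFamNames]
    rw [if_neg (fun hc => h5 ((pvA5 chipset).mp hc))]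
    by_cases h6 : ("tensor".toList <:+: PySem.Chars.lower chipset.toList)
    · rw [if_pos ((pvA6 chipset).mpr h6)]
      have ha := (pvMle6 (PySem.Chars.lower chipset.toList)).mpr (Or.inr (Or.inr (Or.inr (Or.inr (Or.inr (Or.inr (h6)))))))
      have hb : ¬ pvM (PySem.Chars.lower chipset.toList) ≤ 5 := fun h => by
        rcases (pvMle5 (PySem.Chars.lower chipset.toList)).mp h with g|g|g|g|g|g
        exacts [h0 g, h1 g, h2 g, h3 g, h4 g, h5 g]
      have hM : pvM (PySem.Chars.lower chipset.toList) = 6 := by omega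
      have e := pvScan_eq (PySem.Chars.lower chipset.toList) 8 le_rfl
      simp [get_chipset_family_alt, e, hM, pvFamNames]
    rw [if_neg (fun hc => h6 ((pvA6 chipset).mp hc))]
    by_cases h7 : ("kirin".toList <:+: PySem.Chars.lower chipset.toList)
    · rw [if_pos ((pvA7 chipset).mpr h7)]
      have ha := (pvMle7 (PySem.Chars.lower chipset.toList)).mpr (Or.inr (Or.inr (Or.inr (Or.inr (Or.inr (Or.inr (Or.inr (h7))))))))
      have hb : ¬ pvM (PySem.Chars.lower chipset.toList) ≤ 6 := fun h => by
        rcases (pvMle6 (PySem.Chars.lower chipset.toList)).mp h with g|g|g|g|g|g|g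
        exacts [h0 g, h1 g, h2 g, h3 g, h4 g, h5 g, h6 g]
      have hM : pvM (PySem.Chars.lower chipset.toList) = 7 := by omega
      have e := pvScan_eq (PySem.Chars.lower chipset.toList) 8 le_rfl
      simp [get_chipset_family_alt, e, hM, pvFamNames]
    rw [if_neg (fun hc => h7 ((pvA7 chipset).mp hc))]
    have hb : ¬ pvM (PySem.Chars.lower chipset.toList) ≤ 7 := fun h => by
      rcases (pvMle7 (PySem.Chars.lower chipset.toList)).mp h with g|g|g|g|g|g|g|g
      exacts [h0 g, h1 g, h2 g, h3 g, h4 g, h5 g, h6 g, h7 g]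
    have hle := pvM_le_eight (PySem.Chars.lower chipset.toList)
    have hM : pvM (PySem.Chars.lower chipset.toList) = 8 := by omega
    have e := pvScan_eq (PySem.Chars.lower chipset.toList) 8 le_rfl
    simp [get_chipset_family_alt, e, hM, pvFamNames]
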